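-- pv_equiv track=rewrite | github.com/JonathanJdeKoning/CompetitiveProgramming | Problems/Kattis/ordinals.py | ordinal
-- ===== SOURCE A (Python) =====
-- def ordinal(n):
--     if n == 0:
--         return "{}"
--     else:
--         mylist = []
--
--         for i in range(n):
--             mylist.append(ordinal(i))
--         return "{" +",".join(mylist) + "}"
-- ===== SOURCE B (Python) =====
-- def ordinal(n):
--     # Bottom-up: build each ordinal string exactly once, reusing the list of
--     # all smaller ordinals (A recomputes them recursively, exponentially).
--     strs = []
--     for _ in range(n):
--         strs.append("{" + ",".join(strs) + "}")
--     return "{" + ",".join(strs) + "}"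
-- ===== Notes on version B (the rewrite author's own statement) =====
-- stated objective: alternative
-- what changed: Replaces the top-down recursion, which recomputes every smaller ordinal from scratch at every level, by a single bottom-up loop that keeps the list of all smaller ordinal strings and builds each one exactly once.
import Mathlib
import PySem

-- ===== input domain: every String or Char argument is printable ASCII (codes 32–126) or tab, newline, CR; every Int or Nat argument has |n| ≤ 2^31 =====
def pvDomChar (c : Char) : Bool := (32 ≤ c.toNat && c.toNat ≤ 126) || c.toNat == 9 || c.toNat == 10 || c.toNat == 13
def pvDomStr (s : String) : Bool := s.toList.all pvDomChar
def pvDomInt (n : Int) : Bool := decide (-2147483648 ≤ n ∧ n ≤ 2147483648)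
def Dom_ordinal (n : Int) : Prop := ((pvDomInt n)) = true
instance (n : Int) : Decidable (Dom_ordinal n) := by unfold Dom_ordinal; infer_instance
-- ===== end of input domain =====

-- B replaces A's top-down recursion by one bottom-up loop that builds each ordinal string exactly once (alternative decomposition; the output itself is exponential in n).
-- For n < 0 both Pythons return "{}" (empty range), mirrored here via Int.toNat = 0.

-- ===== PORT A =====
-- A's recursion runs over i ∈ range(n) with i < n, so it factors through a Nat helper;
-- for n ≤ 0 Python's range(n) is empty (and n == 0 hits the first branch), matching n.toNat.
def ordinalA : (n : Nat) → String
  | n =>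
    if n = 0 then "{}"
    else
      let mylist := (List.range n).attach.map (fun i => ordinalA i.1)
      "{" ++ PySem.Str.join "," mylist ++ "}"
  termination_by n => n
  decreasing_by exact List.mem_range.mp i.2

def ordinal (n : Int) : String := ordinalA n.toNat

-- ===== PORT B =====
def ordinal_alt (n : Int) : String :=
  let strs := (List.range n.toNat).foldl
    (fun strs _ => strs ++ ["{" ++ PySem.Str.join "," strs ++ "}"]) []
  "{" ++ PySem.Str.join "," strs ++ "}"

-- ===== PRECONDITION & SPEC =====
def Spec_ordinal (n : Int) (out : String) : Prop := out = ordinal_alt n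
instance (n : Int) (out : String) : Decidable (Spec_ordinal n out) := by unfold Spec_ordinal; infer_instance

-- ===== CLAIM (what is proved, stated in full; the proofs are below) =====
def Claim_equal_ordinal : Prop := ∀ (n : Int), Dom_ordinal n → Spec_ordinal n (ordinal n)

-- ===== LEMMAS AND PROOFS =====

-- closed formula for A's recursion, uniform in n (also at n = 0, where the join is empty)
theorem ordinalA_formula (n : Nat) :
    ordinalA n = "{" ++ PySem.Str.join "," ((List.range n).map ordinalA) ++ "}" := by
  rw [ordinalA]
  rcases Nat.eq_zero_or_pos n with h | h
  · subst h; simp; decide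
  · simp [Nat.pos_iff_ne_zero.mp h]

-- B's loop accumulates exactly the list of A's ordinal strings
theorem foldl_strs (n : Nat) :
    (List.range n).foldl
      (fun strs _ => strs ++ ["{" ++ PySem.Str.join "," strs ++ "}"]) []
    = (List.range n).map ordinalA := by
  induction n with
  | zero => simp
  | succ k ih =>
      rw [List.range_succ, List.foldl_append, List.map_append, ih]
      simp [ordinalA_formula k]

-- ===== VERDICT (by name: the statement is the Claim_ definition above) =====
theorem ordinal_spec : Claim_equal_ordinal := by
  intro n _
  show ordinal n = ordinal_alt n
  unfold ordinal ordinal_alt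
  rw [foldl_strs, ← ordinalA_formula]
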